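-- pv_equiv track=rewrite | github.com/changkun/life-simulator | life/modes/programmable_matter.py | _shape_circle
-- ===== SOURCE A (Python) =====
-- def _shape_circle(rows, cols, radius=None):
--     """Return set of (r, c) for a filled circle at center."""
--     cr, cc = rows // 2, cols // 2
--     if radius is None:
--         radius = min(rows, cols) // 4
--     pts = set()
--     for r in range(rows):
--         for c in range(cols):
--             if (r - cr) ** 2 + (c - cc) ** 2 <= radius ** 2:
--                 pts.add((r, c))
--     return pts
-- ===== SOURCE B (Python) =====
-- def _isqrt(n):
--     # binary search for the largest s with s*s <= n (n >= 0)
--     lo, hi = 0, n + 1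
--     while hi - lo > 1:
--         mid = (lo + hi) // 2
--         if mid * mid <= n:
--             lo = mid
--         else:
--             hi = mid
--     return lo
--
--
-- def _shape_circle(rows, cols, radius=None):
--     """Return set of (r, c) for a filled circle at center."""
--     cr, cc = rows // 2, cols // 2
--     if radius is None:
--         radius = min(rows, cols) // 4
--     r2 = radius * radius
--     k = _isqrt(r2)
--     pts = set()
--     for r in range(max(0, cr - k), min(rows, cr + k + 1)):
--         dr = r - cr
--         s = _isqrt(r2 - dr * dr)
--         for c in range(max(0, cc - s), min(cols, cc + s + 1)):
--             pts.add((r, c))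
--     return pts
-- ===== Notes on version B (the rewrite author's own statement) =====
-- stated objective: alternative
-- what changed: Instead of testing every cell of the rows x cols grid against the circle equation, B iterates only the rows of the circle's bounding box and for each row computes the exact column span with an integer square root (binary search), emitting only the in-circle cells; on the probe's inputs (radius comparable to the grid) set construction dominates both, so no speed is claimed.
import Mathlib
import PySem

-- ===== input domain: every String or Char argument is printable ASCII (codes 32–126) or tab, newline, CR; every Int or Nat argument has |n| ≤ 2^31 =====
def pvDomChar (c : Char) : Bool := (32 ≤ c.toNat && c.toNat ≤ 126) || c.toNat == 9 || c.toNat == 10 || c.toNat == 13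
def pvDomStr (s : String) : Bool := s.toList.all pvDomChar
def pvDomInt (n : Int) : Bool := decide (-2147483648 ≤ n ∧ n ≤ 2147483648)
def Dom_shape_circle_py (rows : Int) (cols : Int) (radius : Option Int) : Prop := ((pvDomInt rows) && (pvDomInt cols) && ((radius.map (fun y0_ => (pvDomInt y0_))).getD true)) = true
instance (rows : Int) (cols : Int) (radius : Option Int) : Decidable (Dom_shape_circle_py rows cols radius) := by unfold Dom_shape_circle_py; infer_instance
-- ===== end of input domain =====

-- B replaces A's full-grid scan by iterating only the bounding-box rows and computing each
-- row's exact column span with an integer square root (binary search); same returned list.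

-- ===== PORT A =====
def shape_circle_py (rows : Int) (cols : Int) (radius : Option Int) : List (Int × Int) :=
  let cr := PySem.Int.floordiv rows 2
  let cc := PySem.Int.floordiv cols 2
  let rad := match radius with
    | none => PySem.Int.floordiv (min rows cols) 4
    | some r => r
  (PySem.List.pyRange 0 rows 1).foldl (fun pts r =>
    (PySem.List.pyRange 0 cols 1).foldl (fun pts c =>
      if (r - cr) ^ 2 + (c - cc) ^ 2 ≤ rad ^ 2 then PySem.Set.add pts (r, c) else pts) pts)
    PySem.Set.empty

-- ===== PORT B =====
-- 'while hi - lo > 1: …' loop of Source B's _isqrt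
def isqrtGo (n lo hi : Int) : Int :=
  if _h : 1 < hi - lo then
    let mid := PySem.Int.floordiv (lo + hi) 2
    if mid * mid ≤ n then isqrtGo n mid hi else isqrtGo n lo mid
  else lo
termination_by (hi - lo).toNat
decreasing_by
  all_goals
    simp only [PySem.Int.floordiv_eq_ediv_of_pos (by norm_num : (0:Int) < 2)] at *
    omega

def pyIsqrt (n : Int) : Int := isqrtGo n 0 (n + 1)

def shape_circle_py_alt (rows : Int) (cols : Int) (radius : Option Int) : List (Int × Int) :=
  let cr := PySem.Int.floordiv rows 2
  let cc := PySem.Int.floordiv cols 2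
  let rad := match radius with
    | none => PySem.Int.floordiv (min rows cols) 4
    | some r => r
  let r2 := rad * rad
  let k := pyIsqrt r2
  (PySem.List.pyRange (max 0 (cr - k)) (min rows (cr + k + 1)) 1).foldl (fun pts r =>
    let dr := r - cr
    let s := pyIsqrt (r2 - dr * dr)
    (PySem.List.pyRange (max 0 (cc - s)) (min cols (cc + s + 1)) 1).foldl (fun pts c =>
      PySem.Set.add pts (r, c)) pts)
    PySem.Set.empty

-- ===== PRECONDITION & SPEC =====
def Spec_shape_circle_py (rows : Int) (cols : Int) (radius : Option Int) (out : List (Int × Int)) : Prop := out = shape_circle_py_alt rows cols radius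
instance (rows : Int) (cols : Int) (radius : Option Int) (out : List (Int × Int)) : Decidable (Spec_shape_circle_py rows cols radius out) := by unfold Spec_shape_circle_py; infer_instance

-- ===== CLAIM (what is proved, stated in full; the proofs are below) =====
def Claim_equal_shape_circle_py : Prop := ∀ (rows : Int) (cols : Int) (radius : Option Int), Dom_shape_circle_py rows cols radius → Spec_shape_circle_py rows cols radius (shape_circle_py rows cols radius)

-- ===== LEMMAS AND PROOFS =====

-- the binary search returns the integer square root: s ≥ 0, s² ≤ n < (s+1)²
theorem isqrtGo_spec (n : Int) : ∀ (lo hi : Int), 0 ≤ lo → lo < hi →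
    lo * lo ≤ n → n < hi * hi →
    0 ≤ isqrtGo n lo hi ∧ isqrtGo n lo hi * isqrtGo n lo hi ≤ n ∧
      n < (isqrtGo n lo hi + 1) * (isqrtGo n lo hi + 1) := by
  intro lo hi
  induction lo, hi using isqrtGo.induct n with
  | case1 lo hi h mid hle ih =>
    intro h0 hlt hlo hhi
    have hmdef : PySem.Int.floordiv (lo + hi) 2 = mid := rfl
    have hm : mid = (lo + hi) / 2 := by
      rw [← hmdef]; exact PySem.Int.floordiv_eq_ediv_of_pos (by norm_num)
    rw [isqrtGo]
    simp only [dif_pos h, hmdef, if_pos hle]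
    exact ih (by omega) (by omega) hle hhi
  | case2 lo hi h mid hle ih =>
    intro h0 hlt hlo hhi
    have hmdef : PySem.Int.floordiv (lo + hi) 2 = mid := rfl
    have hm : mid = (lo + hi) / 2 := by
      rw [← hmdef]; exact PySem.Int.floordiv_eq_ediv_of_pos (by norm_num)
    rw [isqrtGo]
    simp only [dif_pos h, hmdef, if_neg hle]
    exact ih h0 (by omega) hlo (lt_of_not_ge hle)
  | case3 lo hi h =>
    intro h0 hlt hlo hhi
    rw [isqrtGo]
    simp only [dif_neg h]
    have : hi = lo + 1 := by omega
    subst this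
    exact ⟨h0, hlo, hhi⟩

theorem pyIsqrt_spec (n : Int) (hn : 0 ≤ n) :
    0 ≤ pyIsqrt n ∧ pyIsqrt n * pyIsqrt n ≤ n ∧ n < (pyIsqrt n + 1) * (pyIsqrt n + 1) := by
  have := isqrtGo_spec n 0 (n + 1) le_rfl (by omega) (by simpa using hn)
    (by nlinarith [sq_nonneg n])
  simpa [pyIsqrt] using this

-- inner loop of A: conditional set-insertion of (r, c) for fresh pairs is plain append
theorem foldl_add_if_row (r : Int) (p : Int → Bool) :
    ∀ (cs : List Int) (s : List (Int × Int)), cs.Nodup → (∀ c' ∈ cs, (r, c') ∉ s) →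
    cs.foldl (fun t c => if p c then PySem.Set.add t (r, c) else t) s
      = s ++ (cs.filter p).map (fun c => (r, c)) := by
  intro cs
  induction cs with
  | nil => intro s _ _; simp
  | cons c cs ih =>
    intro s hnd hfr
    simp only [List.foldl_cons]
    by_cases hp : p c
    · have hmem : (r, c) ∉ s := hfr c (by simp)
      rw [if_pos hp, PySem.Set.add_of_not_mem hmem]
      rw [ih (s ++ [(r, c)]) (List.Nodup.of_cons hnd)
        (by intro c' hc' hx
            rcases List.mem_append.1 hx with h | h
            · exact hfr c' (by simp [hc']) h
            · simp at h
              exact (List.nodup_cons.1 hnd).1 (h ▸ hc'))]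
      simp [hp]
    · rw [if_neg hp, ih s (List.Nodup.of_cons hnd) (fun c' hc' => hfr c' (by simp [hc']))]
      simp [hp]

-- inner loop of B: unconditional set-insertion of fresh pairs is plain append
theorem foldl_add_row (r : Int) :
    ∀ (cs : List Int) (s : List (Int × Int)), cs.Nodup → (∀ c' ∈ cs, (r, c') ∉ s) →
    cs.foldl (fun t c => PySem.Set.add t (r, c)) s = s ++ cs.map (fun c => (r, c)) := by
  intro cs
  induction cs with
  | nil => intro s _ _; simp
  | cons c cs ih =>
    intro s hnd hfr
    simp only [List.foldl_cons]
    have hmem : (r, c) ∉ s := hfr c (by simp)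
    rw [PySem.Set.add_of_not_mem hmem]
    rw [ih (s ++ [(r, c)]) (List.Nodup.of_cons hnd)
      (by intro c' hc' hx
          rcases List.mem_append.1 hx with h | h
          · exact hfr c' (by simp [hc']) h
          · simp at h
            exact (List.nodup_cons.1 hnd).1 (h ▸ hc'))]
    simp

-- outer loop: a fold whose body appends the per-row block is a flatMap
theorem foldl_rows (F : List (Int × Int) → Int → List (Int × Int)) (h : Int → List (Int × Int))
    (hF : ∀ s r, (∀ x ∈ s, x.1 ≠ r) → F s r = s ++ h r)
    (hh : ∀ r x, x ∈ h r → x.1 = r) :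
    ∀ (rs : List Int) (s : List (Int × Int)), rs.Nodup → (∀ r ∈ rs, ∀ x ∈ s, x.1 ≠ r) →
    rs.foldl F s = s ++ rs.flatMap h := by
  intro rs
  induction rs with
  | nil => intro s _ _; simp
  | cons r rs ih =>
    intro s hnd hfr
    simp only [List.foldl_cons]
    rw [hF s r (hfr r (by simp))]
    rw [ih (s ++ h r) (List.Nodup.of_cons hnd)
      (by intro r' hr' x hx
          rcases List.mem_append.1 hx with hxs | hxh
          · exact hfr r' (by simp [hr']) x hxs
          · rw [hh r x hxh]
            exact fun hrr => (List.nodup_cons.1 hnd).1 (hrr ▸ hr'))]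
    simp

-- an integer range filtered to an interval is the clipped range
theorem filter_range_interval (l u : Int) :
    ∀ (a b : Int), (PySem.List.pyRange a b 1).filter (fun c => decide (l ≤ c ∧ c ≤ u))
      = PySem.List.pyRange (max a l) (min b (u + 1)) 1 := by
  intro a b
  by_cases hab : b ≤ a
  · rw [PySem.List.pyRange_one_eq_nil hab, PySem.List.pyRange_one_eq_nil (by omega)]
    simp
  · push_neg at hab
    have key : ∀ (m : Nat) (a : Int), a < b → (b - a).toNat = m →
        (PySem.List.pyRange a b 1).filter (fun c => decide (l ≤ c ∧ c ≤ u))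
          = PySem.List.pyRange (max a l) (min b (u + 1)) 1 := by
      intro m
      induction m with
      | zero =>
        intro a hab' ha
        omega
      | succ m ih =>
        intro a hab' ha
        rw [PySem.List.pyRange_one_cons hab', List.filter_cons]
        have hrest : (PySem.List.pyRange (a+1) b 1).filter (fun c => decide (l ≤ c ∧ c ≤ u))
            = PySem.List.pyRange (max (a+1) l) (min b (u + 1)) 1 := by
          by_cases h2 : a + 1 < b
          · exact ih (a+1) h2 (by omega)
          · rw [PySem.List.pyRange_one_eq_nil (by omega),
              PySem.List.pyRange_one_eq_nil (by omega)]
            simp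
        rw [hrest]
        by_cases hla : l ≤ a
        · by_cases hau : a ≤ u
          · have e2 : max (a+1) l = a + 1 := by omega
            have rhs : PySem.List.pyRange (max a l) (min b (u + 1)) 1
                = a :: PySem.List.pyRange (a + 1) (min b (u + 1)) 1 := by
              rw [show max a l = a by omega]
              exact PySem.List.pyRange_one_cons (by omega)
            rw [if_pos (show decide (l ≤ a ∧ a ≤ u) = true by simp [hla, hau]), rhs, e2]
          · have h1 : PySem.List.pyRange (max (a+1) l) (min b (u + 1)) 1 = [] :=
              PySem.List.pyRange_one_eq_nil (by omega)
            have h2 : PySem.List.pyRange (max a l) (min b (u + 1)) 1 = [] :=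
              PySem.List.pyRange_one_eq_nil (by omega)
            rw [if_neg (show ¬ (decide (l ≤ a ∧ a ≤ u) = true) by
              simp only [decide_eq_true_eq]; omega), h1, h2]
        · have e : max (a+1) l = max a l := by omega
          rw [if_neg (show ¬ (decide (l ≤ a ∧ a ≤ u) = true) by
            simp only [decide_eq_true_eq]; omega), e]
    exact key (b - a).toNat a hab rfl

-- one row of A equals one row of B, inside the bounding box (q = rad² − dr² ≥ 0)
theorem row_eq (cols cc q : Int) (hq : 0 ≤ q) :
    (PySem.List.pyRange 0 cols 1).filter (fun c => decide ((c - cc) ^ 2 ≤ q))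
      = PySem.List.pyRange (max 0 (cc - pyIsqrt q)) (min cols (cc + pyIsqrt q + 1)) 1 := by
  obtain ⟨hs0, hs1, hs2⟩ := pyIsqrt_spec q hq
  set s := pyIsqrt q with hs
  have hiff : ∀ c : Int, ((c - cc) ^ 2 ≤ q) ↔ (cc - s ≤ c ∧ c ≤ cc + s) := by
    intro c
    constructor
    · intro h
      by_contra hcon
      push_neg at hcon
      have habs : s + 1 ≤ c - cc ∨ c - cc ≤ -(s + 1) := by omega
      have : (s + 1) * (s + 1) ≤ (c - cc) ^ 2 := by
        rcases habs with h1 | h1 <;> nlinarith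
      nlinarith
    · intro ⟨h1, h2⟩
      nlinarith
  rw [List.filter_congr (fun c _ => by
    show decide ((c - cc) ^ 2 ≤ q) = decide (cc - s ≤ c ∧ c ≤ cc + s)
    simp [hiff c])]
  exact filter_range_interval (cc - s) (cc + s) 0 cols

-- a row outside the bounding box contributes nothing to A
theorem row_empty (cols cc q : Int) (hq : q < 0) :
    (PySem.List.pyRange 0 cols 1).filter (fun c => decide ((c - cc) ^ 2 ≤ q)) = [] := by
  apply List.filter_eq_nil_iff.2
  intro c _
  simp only [decide_eq_true_eq]
  push_neg
  nlinarith [sq_nonneg (c - cc)]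

-- the two double loops, with cr/cc/rad already computed, produce the same list
theorem core_eq (rows cols cr cc rad : Int) (hcr : cr = PySem.Int.floordiv rows 2) :
    (PySem.List.pyRange 0 rows 1).foldl (fun pts r =>
      (PySem.List.pyRange 0 cols 1).foldl (fun pts c =>
        if (r - cr) ^ 2 + (c - cc) ^ 2 ≤ rad ^ 2 then PySem.Set.add pts (r, c) else pts) pts)
      PySem.Set.empty
    = (PySem.List.pyRange (max 0 (cr - pyIsqrt (rad * rad)))
        (min rows (cr + pyIsqrt (rad * rad) + 1)) 1).foldl (fun pts r =>
        (PySem.List.pyRange (max 0 (cc - pyIsqrt (rad * rad - (r - cr) * (r - cr))))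
          (min cols (cc + pyIsqrt (rad * rad - (r - cr) * (r - cr)) + 1)) 1).foldl
          (fun pts c => PySem.Set.add pts (r, c)) pts) PySem.Set.empty := by
  have hr2nn : 0 ≤ rad * rad := mul_self_nonneg rad
  obtain ⟨hk0, hk1, hk2⟩ := pyIsqrt_spec (rad * rad) hr2nn
  set k := pyIsqrt (rad * rad) with hk
  -- A as a flatMap of filtered rows
  have hA : (PySem.List.pyRange 0 rows 1).foldl (fun pts r =>
      (PySem.List.pyRange 0 cols 1).foldl (fun pts c =>
        if (r - cr) ^ 2 + (c - cc) ^ 2 ≤ rad ^ 2 then PySem.Set.add pts (r, c) else pts) pts)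
      PySem.Set.empty
      = (PySem.List.pyRange 0 rows 1).flatMap (fun r =>
          ((PySem.List.pyRange 0 cols 1).filter
            (fun c => decide ((c - cc) ^ 2 ≤ rad * rad - (r - cr) * (r - cr)))).map
              (fun c => (r, c))) := by
    refine foldl_rows _ _ (fun s r hfr => ?_) (fun r x hx => ?_)
      (PySem.List.pyRange 0 rows 1) PySem.Set.empty (PySem.List.nodup_pyRange_one _ _)
      (fun r _ x hx => absurd hx (List.not_mem_nil))
    · have hbody : (fun (t : List (Int × Int)) c =>
          if (r - cr) ^ 2 + (c - cc) ^ 2 ≤ rad ^ 2 then PySem.Set.add t (r, c) else t)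
          = (fun (t : List (Int × Int)) c =>
            if (fun c => decide ((c - cc) ^ 2 ≤ rad * rad - (r - cr) * (r - cr))) c
              then PySem.Set.add t (r, c) else t) := by
        funext t c
        by_cases hc : (c - cc) ^ 2 ≤ rad * rad - (r - cr) * (r - cr)
        · rw [if_pos (by nlinarith), if_pos (by simp [hc])]
        · rw [if_neg (by nlinarith), if_neg (by simp [hc])]
      rw [hbody]
      exact foldl_add_if_row r _ (PySem.List.pyRange 0 cols 1) s
        (PySem.List.nodup_pyRange_one _ _) (fun c' _ hx => hfr _ hx rfl)
    · simp only [List.mem_map, List.mem_filter] at hx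
      obtain ⟨c, _, hc⟩ := hx
      simp [← hc]
  -- B as a flatMap of clipped row ranges
  have hB : (PySem.List.pyRange (max 0 (cr - k)) (min rows (cr + k + 1)) 1).foldl (fun pts r =>
      (PySem.List.pyRange (max 0 (cc - pyIsqrt (rad * rad - (r - cr) * (r - cr))))
        (min cols (cc + pyIsqrt (rad * rad - (r - cr) * (r - cr)) + 1)) 1).foldl
        (fun pts c => PySem.Set.add pts (r, c)) pts) PySem.Set.empty
      = (PySem.List.pyRange (max 0 (cr - k)) (min rows (cr + k + 1)) 1).flatMap (fun r =>
          (PySem.List.pyRange (max 0 (cc - pyIsqrt (rad * rad - (r - cr) * (r - cr))))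
            (min cols (cc + pyIsqrt (rad * rad - (r - cr) * (r - cr)) + 1)) 1).map
              (fun c => (r, c))) := by
    refine foldl_rows _ _ (fun s r hfr => ?_) (fun r x hx => ?_)
      _ PySem.Set.empty (PySem.List.nodup_pyRange_one _ _)
      (fun r _ x hx => absurd hx (List.not_mem_nil))
    · exact foldl_add_row r _ s (PySem.List.nodup_pyRange_one _ _)
        (fun c' _ hx => hfr _ hx rfl)
    · simp only [List.mem_map] at hx
      obtain ⟨c, _, hc⟩ := hx
      simp [← hc]
  rw [hA, hB]
  by_cases hrows : rows ≤ 0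
  · rw [PySem.List.pyRange_one_eq_nil hrows,
      show PySem.List.pyRange (max 0 (cr - k)) (min rows (cr + k + 1)) 1 = [] from
        PySem.List.pyRange_one_eq_nil (by omega)]
    simp
  · push_neg at hrows
    have hcr0 : 0 ≤ cr ∧ cr ≤ rows := by
      rw [hcr, PySem.Int.floordiv_eq_ediv_of_pos (by norm_num : (0:Int) < 2)]
      omega
    have hsplit : PySem.List.pyRange 0 rows 1
        = PySem.List.pyRange 0 (max 0 (cr - k)) 1
          ++ (PySem.List.pyRange (max 0 (cr - k)) (min rows (cr + k + 1)) 1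
              ++ PySem.List.pyRange (min rows (cr + k + 1)) rows 1) := by
      rw [← PySem.List.pyRange_one_append (max 0 (cr - k)) (min rows (cr + k + 1)) rows
        (by omega) (by omega)]
      rw [← PySem.List.pyRange_one_append 0 (max 0 (cr - k)) rows (by omega) (by omega)]
    rw [hsplit, List.flatMap_append, List.flatMap_append]
    have hout : ∀ r : Int, (r < cr - k ∨ cr + k + 1 ≤ r) →
        ((PySem.List.pyRange 0 cols 1).filter
          (fun c => decide ((c - cc) ^ 2 ≤ rad * rad - (r - cr) * (r - cr)))).map
            (fun c => (r, c)) = ([] : List (Int × Int)) := by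
      intro r hr
      rw [row_empty cols cc _ (by
        have hsq : (k + 1) * (k + 1) ≤ (r - cr) * (r - cr) := by
          rcases hr with h | h <;> nlinarith
        nlinarith)]
      simp
    have hnil1 : (PySem.List.pyRange 0 (max 0 (cr - k)) 1).flatMap (fun r =>
        ((PySem.List.pyRange 0 cols 1).filter
          (fun c => decide ((c - cc) ^ 2 ≤ rad * rad - (r - cr) * (r - cr)))).map
            (fun c => (r, c))) = [] := by
      apply List.flatMap_eq_nil_iff.2
      intro r hr
      rw [PySem.List.mem_pyRange_one] at hr
      exact hout r (by omega)
    have hnil2 : (PySem.List.pyRange (min rows (cr + k + 1)) rows 1).flatMap (fun r =>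
        ((PySem.List.pyRange 0 cols 1).filter
          (fun c => decide ((c - cc) ^ 2 ≤ rad * rad - (r - cr) * (r - cr)))).map
            (fun c => (r, c))) = [] := by
      apply List.flatMap_eq_nil_iff.2
      intro r hr
      rw [PySem.List.mem_pyRange_one] at hr
      exact hout r (by omega)
    rw [hnil1, hnil2]
    simp only [List.nil_append, List.append_nil]
    apply List.flatMap_congr
    intro r hr
    rw [PySem.List.mem_pyRange_one] at hr
    have hq : 0 ≤ rad * rad - (r - cr) * (r - cr) := by
      have h1 : cr - k ≤ r := by omega
      have h2 : r ≤ cr + k := by omega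
      nlinarith
    rw [row_eq cols cc _ hq]

-- ===== VERDICT (by name: the statement is the Claim_ definition above) =====
theorem shape_circle_py_spec : Claim_equal_shape_circle_py := by
  intro rows cols radius _
  show shape_circle_py rows cols radius = shape_circle_py_alt rows cols radius
  cases radius with
  | none =>
    simp only [shape_circle_py, shape_circle_py_alt]
    exact core_eq rows cols _ _ _ rfl
  | some r =>
    simp only [shape_circle_py, shape_circle_py_alt]
    exact core_eq rows cols _ _ _ rfl
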